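-- pv_equiv track=rewrite | github.com/carlorbiz/knowledge-lake-api | agent-conversations/jan/analyze_jan_learnings.py | analyze_time_distribution
-- ===== SOURCE A (Python) =====
-- from collections import defaultdict
-- from typing import Dict, List
--
-- def analyze_time_distribution(conversations: List[Dict]) -> Dict[str, int]:
--     """Analyze conversation distribution over time"""
--
--     date_counts = defaultdict(int)
--
--     for conv in conversations:
--         date_str = conv.get('date', '')
--         if date_str:
--             # Extract year-month
--             try:
--                 year_month = date_str[:7]  # YYYY-MM
--                 date_counts[year_month] += 1
--             except:
--                 pass
--
--     return dict(sorted(date_counts.items()))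
-- ===== SOURCE B (Python) =====
-- from itertools import groupby
-- from typing import Dict, List
--
--
-- def analyze_time_distribution(conversations: List[Dict]) -> Dict[str, int]:
--     """Analyze conversation distribution over time (sort-then-group instead of hash-count-then-sort)."""
--     keys = sorted(date_str[:7] for conv in conversations
--                   if (date_str := conv.get('date', '')))
--     return {k: sum(1 for _ in g) for k, g in groupby(keys)}
-- ===== Notes on version B (the rewrite author's own statement) =====
-- stated objective: alternative
-- what changed: Replaced the defaultdict hash-counter followed by sorting the items with an extract-keys, sort, then groupby run-length counting of consecutive equal keys.
import Mathlib
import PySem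

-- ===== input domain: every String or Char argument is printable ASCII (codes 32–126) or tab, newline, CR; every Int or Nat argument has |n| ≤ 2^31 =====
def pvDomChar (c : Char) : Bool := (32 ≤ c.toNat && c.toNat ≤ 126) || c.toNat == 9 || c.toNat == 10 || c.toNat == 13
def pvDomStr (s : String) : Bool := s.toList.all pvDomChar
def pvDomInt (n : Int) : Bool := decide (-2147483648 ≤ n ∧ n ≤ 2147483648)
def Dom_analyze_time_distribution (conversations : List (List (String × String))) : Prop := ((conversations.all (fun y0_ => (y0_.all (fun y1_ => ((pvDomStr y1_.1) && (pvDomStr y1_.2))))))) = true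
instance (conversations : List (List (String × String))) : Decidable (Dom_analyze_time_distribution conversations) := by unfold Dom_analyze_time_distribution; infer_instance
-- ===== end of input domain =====

-- B replaces A's hash-counter-then-sort-items with extract keys, sort, then count consecutive runs (groupby).

-- ===== PORT A =====
def analyze_time_distribution (conversations : List (List (String × String))) : List (String × Int) :=
  let date_counts : PySem.Dict String Int :=
    conversations.foldl (fun d conv =>
      let date_str := (PySem.Dict.mk conv).getD "date" ""
      if date_str ≠ "" then
        -- date_str is always a str here, so date_str[:7] never raises: the except branch is dead
        let year_month := PySem.Str.slice date_str none (some 7)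
        d.modify year_month 0 (· + 1)
      else d) PySem.Dict.empty
  PySem.List.sorted2 date_counts.items (fun p => p.1) (fun p => p.2)

-- ===== PORT B =====
-- the body of B's generator expression: year-month key of a conversation, none when filtered out
def pvKey? (conv : List (String × String)) : Option String :=
  let date_str := (PySem.Dict.mk conv).getD "date" ""
  if date_str ≠ "" then some (PySem.Str.slice date_str none (some 7)) else none

-- groupby + counting of consecutive equal keys (run-length encoding)
def pvGroupRuns : List String → List (String × Int)
  | [] => []
  | x :: xs =>
    match pvGroupRuns xs with
    | [] => [(x, 1)]
    | (k, n) :: t => if x = k then (x, n + 1) :: t else (x, 1) :: (k, n) :: t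

def analyze_time_distribution_alt (conversations : List (List (String × String))) : List (String × Int) :=
  let keys := PySem.List.sorted (conversations.filterMap pvKey?) (fun s => s)
  pvGroupRuns keys

-- ===== PRECONDITION & SPEC =====
def Spec_analyze_time_distribution (conversations : List (List (String × String))) (out : List (String × Int)) : Prop := out = analyze_time_distribution_alt conversations
instance (conversations : List (List (String × String))) (out : List (String × Int)) : Decidable (Spec_analyze_time_distribution conversations out) := by unfold Spec_analyze_time_distribution; infer_instance

-- ===== CLAIM (what is proved, stated in full; the proofs are below) =====
def Claim_equal_analyze_time_distribution : Prop := ∀ (conversations : List (List (String × String))), Dom_analyze_time_distribution conversations → Spec_analyze_time_distribution conversations (analyze_time_distribution conversations)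

-- ===== LEMMAS AND PROOFS =====

lemma pvGroupRuns_nil_iff (l : List String) : pvGroupRuns l = [] ↔ l = [] := by
  cases l with
  | nil => simp [pvGroupRuns]
  | cons x xs =>
    simp only [pvGroupRuns]
    constructor
    · intro h
      cases hx : pvGroupRuns xs with
      | nil => simp [hx] at h
      | cons p t =>
        obtain ⟨k, n⟩ := p
        rw [hx] at h
        by_cases hxk : x = k <;> simp [hxk] at h
    · intro h; exact absurd h (by simp)

-- run-length encoding of a (≤)-sorted list: membership = (element, its count), keys strictly increasing
lemma pvGroupRuns_spec (l : List String) (hs : l.Pairwise (· ≤ ·)) :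
    (∀ k n, (k, n) ∈ pvGroupRuns l ↔ k ∈ l ∧ n = (l.count k : Int)) ∧
    (pvGroupRuns l).Pairwise (fun a b => a.1 < b.1) := by
  induction l with
  | nil => simp [pvGroupRuns]
  | cons x xs ih =>
    have hx : ∀ y ∈ xs, x ≤ y := fun y hy => List.rel_of_pairwise_cons hs hy
    obtain ⟨ih1, ih2⟩ := ih (List.Pairwise.of_cons hs)
    cases hg : pvGroupRuns xs with
    | nil =>
      have hxs : xs = [] := (pvGroupRuns_nil_iff xs).mp hg
      subst hxs
      constructor
      · intro k n
        simp only [pvGroupRuns, Prod.mk.injEq, List.mem_cons,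
          List.not_mem_nil, or_false, List.count_cons, List.count_nil]
        constructor
        · rintro ⟨rfl, rfl⟩; simp
        · rintro ⟨rfl, rfl⟩; simp
      · simp [pvGroupRuns]
    | cons p t =>
      obtain ⟨k0, n0⟩ := p
      rw [hg] at ih2
      have hk0mem : k0 ∈ xs ∧ n0 = (xs.count k0 : Int) := (ih1 k0 n0).mp (by rw [hg]; simp)
      have hk0t : ∀ q ∈ t, k0 < q.1 := by
        intro q hq
        exact List.rel_of_pairwise_cons ih2 hq
      -- k0 is minimal among xs
      have hk0min : ∀ y ∈ xs, k0 ≤ y := by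
        intro y hy
        have : (y, (xs.count y : Int)) ∈ pvGroupRuns xs := (ih1 y _).mpr ⟨hy, rfl⟩
        rw [hg] at this
        rcases List.mem_cons.mp this with h | h
        · exact le_of_eq (Prod.ext_iff.mp h).1.symm
        · exact le_of_lt (hk0t _ h)
      have hxk0 : x ≤ k0 := hx k0 hk0mem.1
      by_cases hxeq : x = k0
      · -- merge with the first run
        subst hxeq
        have hres : pvGroupRuns (x :: xs) = (x, n0 + 1) :: t := by
          simp [pvGroupRuns, hg]
        constructor
        · intro k n
          rw [hres]
          constructor
          · intro h
            rcases List.mem_cons.mp h with h | h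
            · rw [Prod.mk.injEq] at h
              obtain ⟨rfl, rfl⟩ := h
              refine ⟨by simp, ?_⟩
              rw [List.count_cons_self, hk0mem.2]; push_cast; ring
            · have hmem : (k, n) ∈ pvGroupRuns xs := by rw [hg]; exact List.mem_cons_of_mem _ h
              obtain ⟨hk, hn⟩ := (ih1 k n).mp hmem
              have hkx : x < k := hk0t (k, n) h
              refine ⟨List.mem_cons_of_mem _ hk, ?_⟩
              rw [List.count_cons_of_ne hkx.ne, hn]
          · rintro ⟨hk, rfl⟩
            rcases List.mem_cons.mp hk with rfl | hk
            · refine List.mem_cons.mpr (Or.inl ?_)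
              rw [Prod.mk.injEq]
              exact ⟨rfl, by rw [List.count_cons_self, hk0mem.2]; push_cast; ring⟩
            · by_cases hkx : k = x
              · subst hkx
                refine List.mem_cons.mpr (Or.inl ?_)
                rw [Prod.mk.injEq]
                exact ⟨rfl, by rw [List.count_cons_self, hk0mem.2]; push_cast; ring⟩
              · refine List.mem_cons.mpr (Or.inr ?_)
                rw [List.count_cons_of_ne (Ne.symm hkx)]
                have hmem : (k, (xs.count k : Int)) ∈ pvGroupRuns xs := (ih1 k _).mpr ⟨hk, rfl⟩
                rw [hg] at hmem
                rcases List.mem_cons.mp hmem with h | h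
                · rw [Prod.mk.injEq] at h
                  exact absurd h.1 hkx
                · exact h
        · rw [hres]
          exact List.Pairwise.cons (fun q hq => hk0t q hq) (List.Pairwise.of_cons ih2)
      · -- new run in front
        have hxlt : x < k0 := lt_of_le_of_ne hxk0 hxeq
        have hxnot : x ∉ xs := by
          intro hmem
          exact hxeq (le_antisymm hxk0 (hk0min x hmem))
        have hres : pvGroupRuns (x :: xs) = (x, 1) :: (k0, n0) :: t := by
          simp [pvGroupRuns, hg, hxeq]
        constructor
        · intro k n
          rw [hres]
          constructor
          · intro h
            rcases List.mem_cons.mp h with h | h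
            · rw [Prod.mk.injEq] at h
              obtain ⟨rfl, rfl⟩ := h
              refine ⟨by simp, ?_⟩
              rw [List.count_cons_self, List.count_eq_zero.mpr hxnot]
              simp
            · have hmem : (k, n) ∈ pvGroupRuns xs := by rw [hg]; exact h
              obtain ⟨hk, hn⟩ := (ih1 k n).mp hmem
              have hkx : k ≠ x := fun hc => hxnot (hc ▸ hk)
              refine ⟨List.mem_cons_of_mem _ hk, ?_⟩
              rw [List.count_cons_of_ne (Ne.symm hkx), hn]
          · rintro ⟨hk, rfl⟩
            rcases List.mem_cons.mp hk with rfl | hk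
            · refine List.mem_cons.mpr (Or.inl ?_)
              rw [Prod.mk.injEq]
              exact ⟨rfl, by rw [List.count_cons_self, List.count_eq_zero.mpr hxnot]; simp⟩
            · refine List.mem_cons.mpr (Or.inr ?_)
              have hkx : k ≠ x := fun hc => hxnot (hc ▸ hk)
              rw [List.count_cons_of_ne (Ne.symm hkx)]
              have : (k, (xs.count k : Int)) ∈ pvGroupRuns xs := (ih1 k _).mpr ⟨hk, rfl⟩
              rw [hg] at this; exact this
        · rw [hres]
          refine List.Pairwise.cons ?_ ih2
          intro q hq
          rcases List.mem_cons.mp hq with rfl | hq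
          · exact hxlt
          · exact lt_trans hxlt (hk0t q hq)

-- insertBy only inspects `before x b` for b in the accumulator
lemma insertBy_congr {α : Type} (before before' : α → α → Bool) (x : α) (acc : List α)
    (h : ∀ b ∈ acc, before x b = before' x b) :
    PySem.List.insertBy before x acc = PySem.List.insertBy before' x acc := by
  induction acc with
  | nil => rfl
  | cons y ys ih =>
    simp only [PySem.List.insertBy]
    rw [h y List.mem_cons_self]
    split
    · rfl
    · rw [ih (fun b hb => h b (List.mem_cons_of_mem _ hb))]

-- a fold of insertBy is unchanged when the comparators agree on a superset S of everything compared
lemma foldl_insertBy_congr {α : Type} (before before' : α → α → Bool) (S : List α) :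
    ∀ (l acc : List α), (∀ a ∈ l, a ∈ S) → (∀ a ∈ acc, a ∈ S) →
    (∀ a ∈ S, ∀ b ∈ S, before a b = before' a b) →
    l.foldl (fun acc x => PySem.List.insertBy before x acc) acc
      = l.foldl (fun acc x => PySem.List.insertBy before' x acc) acc := by
  intro l
  induction l with
  | nil => intro acc _ _ _; rfl
  | cons x xs ih =>
    intro acc hl hacc h
    have hxS : x ∈ S := hl x List.mem_cons_self
    simp only [List.foldl_cons]
    rw [insertBy_congr before before' x acc (fun b hb => h x hxS b (hacc b hb))]
    exact ih _ (fun a ha => hl a (List.mem_cons_of_mem _ ha))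
      (fun a ha => by
        rcases (PySem.List.mem_insertBy ..).mp ha with rfl | ha
        · exact hxS
        · exact hacc a ha) h

-- tuple sort = key sort when the first components are pairwise distinct
lemma sorted2_eq_sorted_fst (xs : List (String × Int)) (hnd : (xs.map Prod.fst).Nodup) :
    PySem.List.sorted2 xs (fun p => p.1) (fun p => p.2)
      = PySem.List.sorted xs (fun p => p.1) := by
  rw [PySem.List.sorted_eq_foldl_insertBy]
  simp only [PySem.List.sorted2]
  refine foldl_insertBy_congr _ _ xs xs [] (fun a ha => ha) (by simp) ?_
  intro a ha b hb
  by_cases hab : a.1 < b.1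
  · simp [hab]
  · by_cases hba : b.1 < a.1
    · simp [hab, hba]
    · have hfst : a.1 = b.1 := le_antisymm (not_lt.mp hba) (not_lt.mp hab)
      have hab' : a = b := List.inj_on_of_nodup_map hnd ha hb hfst
      subst hab'
      simp

-- A's counting loop over conversations is Counter of the extracted keys
lemma foldl_body_eq_counter_fold (l : List (List (String × String))) :
    ∀ d : PySem.Dict String Int,
    l.foldl (fun d conv =>
      let date_str := (PySem.Dict.mk conv).getD "date" ""
      if date_str ≠ "" then
        let year_month := PySem.Str.slice date_str none (some 7)
        d.modify year_month 0 (· + 1)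
      else d) d
      = (l.filterMap pvKey?).foldl (fun d x => d.modify x 0 (· + 1)) d := by
  induction l with
  | nil => intro d; rfl
  | cons conv rest ih =>
    intro d
    simp only [List.foldl_cons, List.filterMap_cons, pvKey?]
    by_cases hc : (PySem.Dict.mk conv).getD "date" "" ≠ ""
    · rw [if_pos hc, if_pos hc, List.foldl_cons]
      exact ih _
    · rw [if_neg hc, if_neg hc]
      exact ih _

-- ===== VERDICT (by name: the statement is the Claim_ definition above) =====
theorem analyze_time_distribution_spec : Claim_equal_analyze_time_distribution := by
  intro conversations _
  unfold Spec_analyze_time_distribution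
  unfold analyze_time_distribution analyze_time_distribution_alt
  simp only
  set ks := conversations.filterMap pvKey? with hks
  rw [foldl_body_eq_counter_fold, ← PySem.Dict.counter_eq_foldl]
  -- the sorted run of B
  set l := PySem.List.sorted ks (fun s => s) with hl
  have hlp : l.Pairwise (· ≤ ·) := PySem.List.sorted_pairwise ks (fun s => s)
  obtain ⟨g1, g2⟩ := pvGroupRuns_spec l hlp
  have hitems : (PySem.Dict.counter ks).items
      = (PySem.Set.ofList ks).map (fun k => (k, (ks.count k : Int))) :=
    PySem.Dict.items_counter ks
  have hndfst : ((PySem.Dict.counter ks).items.map Prod.fst).Nodup := by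
    rw [hitems, List.map_map]
    have : (Prod.fst ∘ fun k => (k, (ks.count k : Int))) = id := rfl
    rw [this, List.map_id]
    exact PySem.Set.nodup_ofList ks
  rw [sorted2_eq_sorted_fst _ hndfst]
  -- permutation via nodup + same membership
  have hynodup : (pvGroupRuns l).Nodup :=
    g2.imp (fun {a b} hab => fun hc => absurd (congrArg Prod.fst hc) (ne_of_lt hab))
  have hinodup : (PySem.Dict.counter ks).items.Nodup := by
    rw [hitems]
    exact (PySem.Set.nodup_ofList ks).map
      (fun a b hab => (Prod.mk.injEq .. ▸ hab).1)
  have hperm : (pvGroupRuns l).Perm (PySem.Dict.counter ks).items := by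
    rw [List.perm_ext_iff_of_nodup hynodup hinodup]
    intro p
    obtain ⟨k, n⟩ := p
    rw [g1 k n, hitems, List.mem_map]
    have hcnt : l.count k = ks.count k := (PySem.List.sorted_perm ks (fun s => s) false).count_eq k
    constructor
    · rintro ⟨hk, rfl⟩
      exact ⟨k, (PySem.Set.mem_ofList ks k).mpr ((PySem.List.mem_sorted ..).mp hk), by rw [hcnt]⟩
    · rintro ⟨k', hk', hke⟩
      rw [Prod.mk.injEq] at hke
      obtain ⟨rfl, rfl⟩ := hke
      exact ⟨(PySem.List.mem_sorted ..).mpr ((PySem.Set.mem_ofList ks k').mp hk'), by rw [hcnt]⟩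
  exact PySem.List.sorted_eq_of_perm_of_pairwise_lt ((PySem.Dict.counter ks).items)
    (pvGroupRuns l) (fun p => p.1) hperm g2
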